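-- pv_equiv track=rewrite | github.com/GiorgioRigon/000_progetti | preparazione/10 Progetti/20 CIS/05 Software/app/followup_planner.py | extract_followup_data
-- ===== SOURCE A (Python) =====
-- FOLLOWUP_BLOCK_START = "[WB5 Follow-up]"
--
-- FOLLOWUP_BLOCK_END = "[/WB5 Follow-up]"
--
-- WINDOW_PREFIX = "Finestra:"
--
-- CHANNEL_PREFIX = "Canale:"
--
-- SCRIPT_PREFIX = "Micro-script:"
--
-- REASON_PREFIX = "Motivo:"
--
-- NEXT_STATUS_PREFIX = "Stato successivo:"
--
-- def extract_followup_data(notes: str | None) -> dict[str, str]: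
--     data = {
--         "followup_window": "",
--         "channel": "",
--         "micro_script": "",
--         "reason": "",
--         "next_status": "",
--     }
--
--     for line in _extract_block_lines(notes or "", FOLLOWUP_BLOCK_START, FOLLOWUP_BLOCK_END):
--         if line.startswith(WINDOW_PREFIX):
--             data["followup_window"] = line.split(":", 1)[1].strip()
--         elif line.startswith(CHANNEL_PREFIX):
--             data["channel"] = line.split(":", 1)[1].strip()
--         elif line.startswith(SCRIPT_PREFIX):
--             data["micro_script"] = line.split(":", 1)[1].strip()
--         elif line.startswith(REASON_PREFIX):
--             data["reason"] = line.split(":", 1)[1].strip()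
--         elif line.startswith(NEXT_STATUS_PREFIX):
--             data["next_status"] = line.split(":", 1)[1].strip()
--
--     return data
--
-- def _extract_block_lines(text: str, block_start: str, block_end: str) -> list[str]:
--     inside_block = False
--     collected_lines: list[str] = []
--
--     for raw_line in text.splitlines():
--         line = raw_line.strip()
--         if line == block_start:
--             inside_block = True
--             continue
--         if line == block_end:
--             break
--         if inside_block and line:
--             collected_lines.append(line)
--
--     return collected_lines
-- ===== SOURCE B (Python) =====
-- FOLLOWUP_BLOCK_START = "[WB5 Follow-up]"
-- FOLLOWUP_BLOCK_END = "[/WB5 Follow-up]"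
--
--
-- def extract_followup_data(notes: str | None) -> dict[str, str]:
--     # Staged, declarative approach: locate the block by index/slice, then
--     # search per field (last matching line wins, as dict overwrites in A).
--     lines = [raw.strip() for raw in (notes or "").splitlines()]
--     if FOLLOWUP_BLOCK_END in lines:
--         lines = lines[:lines.index(FOLLOWUP_BLOCK_END)]
--     if FOLLOWUP_BLOCK_START in lines:
--         block = lines[lines.index(FOLLOWUP_BLOCK_START) + 1:]
--     else:
--         block = []
--
--     def last_value(prefix: str) -> str:
--         for line in reversed(block):
--             if line.startswith(prefix):
--                 return line.split(":", 1)[1].strip()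
--         return ""
--
--     return {
--         "followup_window": last_value("Finestra:"),
--         "channel": last_value("Canale:"),
--         "micro_script": last_value("Micro-script:"),
--         "reason": last_value("Motivo:"),
--         "next_status": last_value("Stato successivo:"),
--     }
-- ===== Notes on version B (the rewrite author's own statement) =====
-- stated objective: alternative
-- what changed: B replaces A's stateful line-by-line state machine (inside-block flag, collect, then an if/elif dispatch fold) by a staged declarative computation: strip all lines, cut the list at the end tag via index/slice, slice off everything after the first start tag, and fill each of the five fields by an independent reverse search for the last line with that prefix.
import Mathlib
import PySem

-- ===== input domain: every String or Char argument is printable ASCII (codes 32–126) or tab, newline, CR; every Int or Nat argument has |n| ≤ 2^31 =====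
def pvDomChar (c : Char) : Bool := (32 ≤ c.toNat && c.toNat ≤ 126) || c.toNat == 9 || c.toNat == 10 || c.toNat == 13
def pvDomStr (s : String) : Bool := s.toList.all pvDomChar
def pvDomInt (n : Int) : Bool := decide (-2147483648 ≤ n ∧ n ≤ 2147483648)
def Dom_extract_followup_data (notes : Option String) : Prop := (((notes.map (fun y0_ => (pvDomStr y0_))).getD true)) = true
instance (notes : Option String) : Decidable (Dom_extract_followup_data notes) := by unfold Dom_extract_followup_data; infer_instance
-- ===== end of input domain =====

-- B replaces A's one-pass state machine + dispatch fold by a staged computation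
-- (cut at end tag, slice after start tag, per-field reverse search); objective: alternative.

-- module constants
def FOLLOWUP_BLOCK_START : String := "[WB5 Follow-up]"
def FOLLOWUP_BLOCK_END : String := "[/WB5 Follow-up]"
def WINDOW_PREFIX : String := "Finestra:"
def CHANNEL_PREFIX : String := "Canale:"
def SCRIPT_PREFIX : String := "Micro-script:"
def REASON_PREFIX : String := "Motivo:"
def NEXT_STATUS_PREFIX : String := "Stato successivo:"

-- line.split(":", 1)[1].strip() — the [1] index always exists where either program evaluates it,
-- because the line then starts with a prefix that contains ':' (so the split has ≥ 2 pieces).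
def pvAfterColon (line : String) : String :=
  PySem.Str.strip (((PySem.Str.splitMax? line ":" 1).getD []).getD 1 "")

-- ===== PORT A =====
-- _extract_block_lines: loop over splitlines, state = (inside_block, collected_lines)
def pvBlockLinesAux (bs be : String) : List String → Bool → List String → List String
  | [], _, acc => acc
  | raw :: rest, inside, acc =>
    let line := PySem.Str.strip raw
    if line == bs then pvBlockLinesAux bs be rest true acc
    else if line == be then acc
    else if inside && !(line == "") then pvBlockLinesAux bs be rest inside (acc ++ [line])
    else pvBlockLinesAux bs be rest inside acc

def pvExtractBlockLines (text bs be : String) : List String :=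
  pvBlockLinesAux bs be (PySem.Str.splitlines text) false []

-- the body of A's for-loop (the if/elif ladder)
def pvDispatchA (d : PySem.Dict String String) (line : String) : PySem.Dict String String :=
  if PySem.Str.startswith line WINDOW_PREFIX then d.insert "followup_window" (pvAfterColon line)
  else if PySem.Str.startswith line CHANNEL_PREFIX then d.insert "channel" (pvAfterColon line)
  else if PySem.Str.startswith line SCRIPT_PREFIX then d.insert "micro_script" (pvAfterColon line)
  else if PySem.Str.startswith line REASON_PREFIX then d.insert "reason" (pvAfterColon line)
  else if PySem.Str.startswith line NEXT_STATUS_PREFIX then d.insert "next_status" (pvAfterColon line)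
  else d

def extract_followup_data (notes : Option String) : List (String × String) :=
  ((pvExtractBlockLines (notes.getD "") FOLLOWUP_BLOCK_START FOLLOWUP_BLOCK_END).foldl
    pvDispatchA (PySem.Dict.ofList
      [("followup_window", ""), ("channel", ""), ("micro_script", ""), ("reason", ""), ("next_status", "")])).items

-- ===== PORT B =====
-- lines[:lines.index(END)] if END in lines else lines
def pvCutAtEnd (ls : List String) : List String :=
  match PySem.List.index? ls FOLLOWUP_BLOCK_END with
  | some i => ls.take i
  | none => ls

-- lines[lines.index(START)+1:] if START in lines else []
def pvBlockOf (ls : List String) : List String :=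
  match PySem.List.index? ls FOLLOWUP_BLOCK_START with
  | some i => ls.drop (i + 1)
  | none => []

-- the `for line in reversed(block): …` loop of last_value
def pvLastAux (pre : String) : List String → String
  | [] => ""
  | l :: rest => if PySem.Str.startswith l pre then pvAfterColon l else pvLastAux pre rest

def pvLastValue (pre : String) (block : List String) : String :=
  pvLastAux pre block.reverse

def pvFields (block : List String) : List (String × String) :=
  [("followup_window", pvLastValue WINDOW_PREFIX block),
   ("channel", pvLastValue CHANNEL_PREFIX block),
   ("micro_script", pvLastValue SCRIPT_PREFIX block),
   ("reason", pvLastValue REASON_PREFIX block),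
   ("next_status", pvLastValue NEXT_STATUS_PREFIX block)]

def extract_followup_data_alt (notes : Option String) : List (String × String) :=
  pvFields (pvBlockOf (pvCutAtEnd ((PySem.Str.splitlines (notes.getD "")).map PySem.Str.strip)))

-- ===== PRECONDITION & SPEC =====
def Spec_extract_followup_data (notes : Option String) (out : List (String × String)) : Prop := out = extract_followup_data_alt notes
instance (notes : Option String) (out : List (String × String)) : Decidable (Spec_extract_followup_data notes out) := by unfold Spec_extract_followup_data; infer_instance

-- ===== CLAIM (what is proved, stated in full; the proofs are below) =====
def Claim_equal_extract_followup_data : Prop := ∀ (notes : Option String), Dom_extract_followup_data notes → Spec_extract_followup_data notes (extract_followup_data notes)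

-- ===== LEMMAS AND PROOFS =====

-- proof-side recursive characterization of A's collected lines, over the STRIPPED lines
def pvColl : List String → Bool → List String
  | [], _ => []
  | l :: rest, inside =>
    if l == FOLLOWUP_BLOCK_START then pvColl rest true
    else if l == FOLLOWUP_BLOCK_END then []
    else if inside && !(l == "") then l :: pvColl rest inside
    else pvColl rest inside

-- lines a dispatch step ignores (further start tags and blanks)
def pvKeep (l : String) : Bool := !(l == FOLLOWUP_BLOCK_START) && !(l == "")

-- proof-side "everything after the first start tag"
def pvDropS : List String → List String
  | [] => []
  | l :: rest => if l == FOLLOWUP_BLOCK_START then rest else pvDropS rest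

-- the forward last-match-wins accumulator (what A's dict field becomes)
def pvUpd (v pre : String) (ls : List String) : String :=
  ls.foldl (fun acc l => if PySem.Str.startswith l pre then pvAfterColon l else acc) v

theorem pvBlockLinesAux_eq_coll (raws : List String) :
    ∀ (inside : Bool) (acc : List String),
      pvBlockLinesAux FOLLOWUP_BLOCK_START FOLLOWUP_BLOCK_END raws inside acc
        = acc ++ pvColl (raws.map PySem.Str.strip) inside := by
  induction raws with
  | nil => intro inside acc; simp [pvBlockLinesAux, pvColl]
  | cons raw rest ih =>
    intro inside acc
    simp only [pvBlockLinesAux, List.map_cons, pvColl]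
    split_ifs with h1 h2 h3
    · exact ih true acc
    · simp
    · rw [ih inside (acc ++ [PySem.Str.strip raw])]; simp
    · exact ih inside acc

theorem pvColl_true (ls : List String) :
    pvColl ls true = (ls.takeWhile (fun l => !(l == FOLLOWUP_BLOCK_END))).filter pvKeep := by
  induction ls with
  | nil => simp [pvColl]
  | cons l rest ih =>
    simp only [pvColl]
    by_cases h1 : l == FOLLOWUP_BLOCK_START
    · have hE : (l == FOLLOWUP_BLOCK_END) = false := by
        rw [eq_of_beq h1]; decide
      simp [hE, pvKeep, h1, ih]
    · by_cases h2 : l == FOLLOWUP_BLOCK_END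
      · simp [eq_of_beq h2, show ¬ (FOLLOWUP_BLOCK_END = FOLLOWUP_BLOCK_START) from by decide]
      · by_cases h3 : l == ""
        · simp [h1, h2, h3, pvKeep, ih]
        · simp [h1, h2, h3, pvKeep, ih]

theorem pvColl_false (ls : List String) :
    pvColl ls false
      = (pvDropS (ls.takeWhile (fun l => !(l == FOLLOWUP_BLOCK_END)))).filter pvKeep := by
  induction ls with
  | nil => simp [pvColl, pvDropS]
  | cons l rest ih =>
    simp only [pvColl]
    by_cases h1 : l == FOLLOWUP_BLOCK_START
    · have hE : (l == FOLLOWUP_BLOCK_END) = false := by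
        rw [eq_of_beq h1]; decide
      simp [hE, pvDropS, h1, pvColl_true]
    · by_cases h2 : l == FOLLOWUP_BLOCK_END
      · simp [List.takeWhile_cons, eq_of_beq h2, pvDropS, show ¬ (FOLLOWUP_BLOCK_END = FOLLOWUP_BLOCK_START) from by decide]
      · simp [h1, h2, pvDropS, ih]

-- B's index/slice stages compute takeWhile and pvDropS
theorem pvCutAtEnd_eq (ls : List String) :
    pvCutAtEnd ls = ls.takeWhile (fun l => !(l == FOLLOWUP_BLOCK_END)) := by
  induction ls with
  | nil => rfl
  | cons l rest ih =>
    unfold pvCutAtEnd at *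
    by_cases h : l == FOLLOWUP_BLOCK_END
    · rw [eq_of_beq h]
      rw [PySem.List.index?_cons_self]
      simp
    · have hne : l ≠ FOLLOWUP_BLOCK_END := fun he => h (by simp [he])
      rw [PySem.List.index?_cons_of_ne rest hne]
      simp only [List.takeWhile_cons, h, Bool.not_false, if_true]
      cases hidx : PySem.List.index? rest FOLLOWUP_BLOCK_END with
      | none => rw [hidx] at ih; simpa using ih
      | some i => rw [hidx] at ih; simpa using ih

theorem pvBlockOf_eq (ls : List String) : pvBlockOf ls = pvDropS ls := by
  induction ls with
  | nil => rfl
  | cons l rest ih =>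
    unfold pvBlockOf at *
    by_cases h : l == FOLLOWUP_BLOCK_START
    · rw [eq_of_beq h, PySem.List.index?_cons_self]
      simp [pvDropS]
    · have hne : l ≠ FOLLOWUP_BLOCK_START := fun he => h (by simp [he])
      rw [PySem.List.index?_cons_of_ne rest hne]
      simp only [pvDropS, h, Bool.false_eq_true, if_false]
      cases hidx : PySem.List.index? rest FOLLOWUP_BLOCK_START with
      | none => rw [hidx] at ih; simpa using ih
      | some i => rw [hidx] at ih; simpa using ih

-- two distinct field prefixes never match the same line
theorem pvExcl (l p q : String) (h1 : ¬ (p.toList <+: q.toList)) (h2 : ¬ (q.toList <+: p.toList))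
    (hp : PySem.Str.startswith l p = true) : PySem.Str.startswith l q = false := by
  by_contra hq
  rw [Bool.not_eq_false] at hq
  rw [PySem.Str.startswith_eq, PySem.Chars.startswith_iff] at hp hq
  rcases List.prefix_or_prefix_of_prefix hp hq with h | h
  · exact h1 h
  · exact h2 h

-- A's fold over the dict, field by field
theorem pvFold_eq_upd (ls : List String) :
    ∀ (a b c d e : String),
      ls.foldl pvDispatchA (PySem.Dict.ofList
        [("followup_window", a), ("channel", b), ("micro_script", c), ("reason", d), ("next_status", e)])
      = PySem.Dict.ofList
        [("followup_window", pvUpd a WINDOW_PREFIX ls), ("channel", pvUpd b CHANNEL_PREFIX ls),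
         ("micro_script", pvUpd c SCRIPT_PREFIX ls), ("reason", pvUpd d REASON_PREFIX ls),
         ("next_status", pvUpd e NEXT_STATUS_PREFIX ls)] := by
  induction ls with
  | nil => intro a b c d e; simp [pvUpd]
  | cons l rest ih =>
    intro a b c d e
    simp only [List.foldl_cons, pvUpd, pvDispatchA]
    by_cases hW : PySem.Str.startswith l WINDOW_PREFIX
    · have hC := pvExcl l WINDOW_PREFIX CHANNEL_PREFIX (by decide) (by decide) hW
      have hS := pvExcl l WINDOW_PREFIX SCRIPT_PREFIX (by decide) (by decide) hW
      have hR := pvExcl l WINDOW_PREFIX REASON_PREFIX (by decide) (by decide) hW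
      have hN := pvExcl l WINDOW_PREFIX NEXT_STATUS_PREFIX (by decide) (by decide) hW
      simp only [hW, hC, hS, hR, hN, if_true, Bool.false_eq_true, if_false]
      rw [show (PySem.Dict.ofList
        [("followup_window", a), ("channel", b), ("micro_script", c), ("reason", d), ("next_status", e)]).insert
          "followup_window" (pvAfterColon l)
        = PySem.Dict.ofList
        [("followup_window", pvAfterColon l), ("channel", b), ("micro_script", c), ("reason", d), ("next_status", e)] from rfl]
      exact ih _ _ _ _ _
    · by_cases hC : PySem.Str.startswith l CHANNEL_PREFIX
      · have hS := pvExcl l CHANNEL_PREFIX SCRIPT_PREFIX (by decide) (by decide) hC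
        have hR := pvExcl l CHANNEL_PREFIX REASON_PREFIX (by decide) (by decide) hC
        have hN := pvExcl l CHANNEL_PREFIX NEXT_STATUS_PREFIX (by decide) (by decide) hC
        simp only [hW, hC, hS, hR, hN, if_true, Bool.false_eq_true, if_false]
        rw [show (PySem.Dict.ofList
          [("followup_window", a), ("channel", b), ("micro_script", c), ("reason", d), ("next_status", e)]).insert
            "channel" (pvAfterColon l)
          = PySem.Dict.ofList
          [("followup_window", a), ("channel", pvAfterColon l), ("micro_script", c), ("reason", d), ("next_status", e)] from rfl]
        exact ih _ _ _ _ _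
      · by_cases hS : PySem.Str.startswith l SCRIPT_PREFIX
        · have hR := pvExcl l SCRIPT_PREFIX REASON_PREFIX (by decide) (by decide) hS
          have hN := pvExcl l SCRIPT_PREFIX NEXT_STATUS_PREFIX (by decide) (by decide) hS
          simp only [hW, hC, hS, hR, hN, if_true, Bool.false_eq_true, if_false]
          rw [show (PySem.Dict.ofList
            [("followup_window", a), ("channel", b), ("micro_script", c), ("reason", d), ("next_status", e)]).insert
              "micro_script" (pvAfterColon l)
            = PySem.Dict.ofList
            [("followup_window", a), ("channel", b), ("micro_script", pvAfterColon l), ("reason", d), ("next_status", e)] from rfl]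
          exact ih _ _ _ _ _
        · by_cases hR : PySem.Str.startswith l REASON_PREFIX
          · have hN := pvExcl l REASON_PREFIX NEXT_STATUS_PREFIX (by decide) (by decide) hR
            simp only [hW, hC, hS, hR, hN, if_true, Bool.false_eq_true, if_false]
            rw [show (PySem.Dict.ofList
              [("followup_window", a), ("channel", b), ("micro_script", c), ("reason", d), ("next_status", e)]).insert
                "reason" (pvAfterColon l)
              = PySem.Dict.ofList
              [("followup_window", a), ("channel", b), ("micro_script", c), ("reason", pvAfterColon l), ("next_status", e)] from rfl]
            exact ih _ _ _ _ _
          · by_cases hN : PySem.Str.startswith l NEXT_STATUS_PREFIX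
            · simp only [hW, hC, hS, hR, hN, if_true, Bool.false_eq_true, if_false]
              rw [show (PySem.Dict.ofList
                [("followup_window", a), ("channel", b), ("micro_script", c), ("reason", d), ("next_status", e)]).insert
                  "next_status" (pvAfterColon l)
                = PySem.Dict.ofList
                [("followup_window", a), ("channel", b), ("micro_script", c), ("reason", d), ("next_status", pvAfterColon l)] from rfl]
              exact ih _ _ _ _ _
            · simp only [hW, hC, hS, hR, hN, Bool.false_eq_true, if_false]
              exact ih _ _ _ _ _

-- dropping lines the dispatch ignores does not change a field
theorem pvUpd_filter (pre : String)
    (hS : PySem.Str.startswith FOLLOWUP_BLOCK_START pre = false)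
    (hE : PySem.Str.startswith "" pre = false) (bs : List String) :
    ∀ v, pvUpd v pre (bs.filter pvKeep) = pvUpd v pre bs := by
  induction bs with
  | nil => intro v; rfl
  | cons l rest ih =>
    intro v
    by_cases hk : pvKeep l
    · simp only [List.filter_cons, hk, if_true, pvUpd, List.foldl_cons]
      exact ih _
    · have hmatch : PySem.Str.startswith l pre = false := by
        unfold pvKeep at hk
        rcases Bool.and_eq_false_iff.mp (Bool.not_eq_true _ ▸ hk) with h | h
        · rw [eq_of_beq (Bool.not_eq_false' .. ▸ h : (l == FOLLOWUP_BLOCK_START) = true)]; exact hS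
        · rw [eq_of_beq (Bool.not_eq_false' .. ▸ h : (l == "") = true)]; exact hE
      simp only [List.filter_cons, hk, Bool.false_eq_true, if_false, pvUpd, List.foldl_cons, hmatch]
      exact ih v

-- the forward accumulator from "" is B's reverse first match
theorem pvUpd_eq_lastValue (pre : String) (ls : List String) :
    pvUpd "" pre ls = pvLastValue pre ls := by
  unfold pvLastValue
  induction ls using List.reverseRecOn with
  | nil => rfl
  | append_singleton ls l ih =>
    unfold pvUpd at *
    rw [List.foldl_append, List.reverse_append]
    simp only [List.foldl_cons, List.foldl_nil, List.reverse_cons, List.reverse_nil,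
      List.nil_append, List.singleton_append, pvLastAux]
    rw [ih]

-- ===== VERDICT (by name: the statement is the Claim_ definition above) =====
theorem extract_followup_data_spec : Claim_equal_extract_followup_data := by
  intro notes _
  unfold Spec_extract_followup_data extract_followup_data extract_followup_data_alt pvExtractBlockLines
  rw [pvBlockLinesAux_eq_coll, List.nil_append, pvColl_false, pvFold_eq_upd]
  rw [pvCutAtEnd_eq, pvBlockOf_eq]
  rw [pvUpd_filter WINDOW_PREFIX (by decide) (by decide),
      pvUpd_filter CHANNEL_PREFIX (by decide) (by decide),
      pvUpd_filter SCRIPT_PREFIX (by decide) (by decide),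
      pvUpd_filter REASON_PREFIX (by decide) (by decide),
      pvUpd_filter NEXT_STATUS_PREFIX (by decide) (by decide)]
  rw [pvUpd_eq_lastValue, pvUpd_eq_lastValue, pvUpd_eq_lastValue, pvUpd_eq_lastValue, pvUpd_eq_lastValue]
  rfl
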